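-- pv_equiv track=rewrite | github.com/zhengzaixiazai/autosub | autosub/sub_utils.py | get_slice_pos_dict
-- ===== SOURCE A (Python) =====
-- def get_slice_pos_dict(
--         sentence,
--         delimiters=" "
-- ):
--     """
--     Get word position dictionary from sentence.
--     """
--     i = 0
--     j = 0
--     result_dict = {}
--     length = len(sentence)
--     while i < length:
--         if sentence[i] in delimiters:
--             if i != j and sentence[j:i].strip(" "):
--                 slice_ = sentence[j:i].lstrip(" ")
--                 index = result_dict.get(slice_)
--                 if not index:
--                     result_dict[slice_] = [j]
--                 else:
--                     result_dict[slice_].append(j)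
--             j = i + 1
--         i = i + 1
--
--     if i != j and sentence[j:i].strip(" "):
--         slice_ = sentence[j:i].lstrip(" ")
--         index = result_dict.get(slice_)
--         if not index:
--             result_dict[slice_] = [j]
--         else:
--             result_dict[slice_].append(j)
--
--     return result_dict
-- ===== SOURCE B (Python) =====
-- def get_slice_pos_dict(
--         sentence,
--         delimiters=" "
-- ):
--     """
--     Get word position dictionary from sentence.
--
--     Normalize every delimiter character to the first one with str.replace,
--     cut the sentence with str.split, and recover each piece's start index
--     as a running sum of piece lengths.
--     """
--     if delimiters:
--         d0 = delimiters[0]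
--         normalized = sentence
--         for ch in delimiters[1:]:
--             normalized = normalized.replace(ch, d0)
--         parts = normalized.split(d0)
--     else:
--         parts = [sentence]
--     result = {}
--     pos = 0
--     for part in parts:
--         if part.strip(" "):
--             result.setdefault(part.lstrip(" "), []).append(pos)
--         pos += len(part) + 1
--     return result
-- ===== Notes on version B (the rewrite author's own statement) =====
-- stated objective: idiomatic
-- what changed: Replaces A's per-character while-loop with tracked indices i/j and manual slicing by a normalize-and-split pipeline: every delimiter character is first rewritten to the first delimiter with str.replace, the sentence is cut once with str.split, and each piece's start position is recovered as a running sum of piece lengths (no character indexing at all).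
import Mathlib
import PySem

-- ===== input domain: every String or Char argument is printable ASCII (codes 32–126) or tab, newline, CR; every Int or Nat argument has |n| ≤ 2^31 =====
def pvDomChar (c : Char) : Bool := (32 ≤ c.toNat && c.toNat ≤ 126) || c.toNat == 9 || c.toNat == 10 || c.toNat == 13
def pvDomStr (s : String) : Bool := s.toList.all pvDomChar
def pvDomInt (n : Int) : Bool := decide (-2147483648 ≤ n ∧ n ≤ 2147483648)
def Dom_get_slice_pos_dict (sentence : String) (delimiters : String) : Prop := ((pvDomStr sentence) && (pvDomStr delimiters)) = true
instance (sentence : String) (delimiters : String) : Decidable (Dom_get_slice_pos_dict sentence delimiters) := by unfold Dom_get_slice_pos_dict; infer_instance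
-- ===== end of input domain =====

-- B replaces A's per-character index-tracking scan by a normalize-and-split pipeline
-- (str.replace every delimiter to the first one, one str.split, positions as running
-- length sums); idiomatic restructuring, same asymptotic cost.

-- ===== PORT A =====

-- s.lstrip(" ") — hand port (Python's lstrip(" ") drops exactly the leading ' ' characters).
def pvLstripSpace (cs : List Char) : List Char := cs.dropWhile (· == ' ')

-- the duplicated flush block of A (body of the `if sentence[i] in delimiters` branch and
-- the trailing copy after the loop): record segment sentence[j:i] at start j
def pvFlushA (s : List Char) (j i : Int) (d : PySem.Dict (List Char) (List Int)) :
    PySem.Dict (List Char) (List Int) :=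
  if i ≠ j ∧ PySem.Chars.stripChars (PySem.List.slice s (some j) (some i)) [' '] ≠ [] then
    let slice_ := pvLstripSpace (PySem.List.slice s (some j) (some i))
    match d.get? slice_ with
    | none => d.insert slice_ [j]
    | some index => if index = [] then d.insert slice_ [j]
                    else d.modify slice_ [] (fun xs => xs ++ [j])
  else d

-- A's while-loop: fuel counts the remaining iterations (length - i); returns (j, dict)
def pvLoopA (s ds : List Char) : Nat → Int → Int → PySem.Dict (List Char) (List Int) →
    Int × PySem.Dict (List Char) (List Int)
  | 0, _, j, d => (j, d)
  | fuel + 1, i, j, d =>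
    match PySem.List.pyGet? s i with
    | none => (j, d)  -- unreachable: fuel keeps i < length
    | some c =>
      if PySem.Chars.isIn [c] ds then
        pvLoopA s ds fuel (i + 1) (i + 1) (pvFlushA s j i d)
      else
        pvLoopA s ds fuel (i + 1) j d

def get_slice_pos_dict (sentence : String) (delimiters : String) : List (String × List Int) :=
  let s := sentence.toList
  let p := pvLoopA s delimiters.toList s.length 0 0 PySem.Dict.empty
  let d := pvFlushA s p.1 (s.length : Int) p.2
  d.items.map (fun kv => (String.ofList kv.1, kv.2))

-- ===== PORT B =====

-- body of B's for-loop over the split pieces: state is (pos, dict);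
-- if part.strip(" "): result.setdefault(part.lstrip(" "), []).append(pos); pos += len(part)+1
def pvStepB (st : Int × PySem.Dict (List Char) (List Int)) (part : List Char) :
    Int × PySem.Dict (List Char) (List Int) :=
  let d :=
    if PySem.Chars.stripChars part [' '] ≠ [] then
      let key := pvLstripSpace part
      ((st.2.setdefault key []).modify key [] (fun xs => xs ++ [st.1]))
    else st.2
  (st.1 + (part.length : Int) + 1, d)

def get_slice_pos_dict_alt (sentence : String) (delimiters : String) : List (String × List Int) :=
  let s := sentence.toList
  let parts :=
    match delimiters.toList with
    | [] => [s]
    | d0 :: rest =>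
      -- normalized = sentence with every delimiter replaced by d0, then split on d0
      PySem.Chars.splitOn
        (rest.foldl (fun acc ch => PySem.Chars.replace acc [ch] [d0]) s) [d0]
  let r := parts.foldl pvStepB (0, PySem.Dict.empty)
  r.2.items.map (fun kv => (String.ofList kv.1, kv.2))

-- ===== PRECONDITION & SPEC =====
def Spec_get_slice_pos_dict (sentence : String) (delimiters : String) (out : List (String × List Int)) : Prop := out = get_slice_pos_dict_alt sentence delimiters
instance (sentence : String) (delimiters : String) (out : List (String × List Int)) : Decidable (Spec_get_slice_pos_dict sentence delimiters out) := by unfold Spec_get_slice_pos_dict; infer_instance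

-- ===== CLAIM (what is proved, stated in full; the proofs are below) =====
def Claim_equal_get_slice_pos_dict : Prop := ∀ (sentence : String) (delimiters : String), Dom_get_slice_pos_dict sentence delimiters → Spec_get_slice_pos_dict sentence delimiters (get_slice_pos_dict sentence delimiters)

-- ===== LEMMAS AND PROOFS =====

-- structural characterisation of str.split on a single-character separator
def pvMySplit (d : Char) : List Char → List (List Char)
  | [] => [[]]
  | c :: t => if c = d then [] :: pvMySplit d t
              else (pvMySplit d t).modifyHead (fun x => c :: x)

lemma pvModifyHead_comp {α : Type} (f g : List α → List α) (l : List (List α)) :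
    (l.modifyHead g).modifyHead f = l.modifyHead (fun x => f (g x)) := by
  cases l <;> simp

lemma pvModifyHead_id {α : Type} (l : List (List α)) :
    l.modifyHead (fun x => x) = l := by
  cases l <;> simp

-- an empty slice: s[j:j] = []
lemma pvSlice_self (s : List Char) (j : Int) : PySem.List.slice s (some j) (some j) = [] := by
  have h := PySem.List.length_slice s j j
  simp at h
  exact h

-- setdefault k v then overwrite k in place = plain overwrite
lemma pvSetdefault_insert (d : PySem.Dict (List Char) (List Int)) (k : List Char)
    (v w : List Int) : (d.setdefault k v).insert k w = d.insert k w := by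
  by_cases h : d.contains k
  · rw [PySem.Dict.setdefault_of_contains d v h]
  · rw [PySem.Dict.setdefault_of_not_contains d v (by simpa using h)]
    rw [PySem.Dict.insert_insert_self]

-- A's flush block and B's loop body build the same dictionary (part := s[j:i])
lemma pvFlush_eq (s : List Char) (j i : Int) (d : PySem.Dict (List Char) (List Int)) :
    (pvStepB (j, d) (PySem.List.slice s (some j) (some i))).2 = pvFlushA s j i d := by
  unfold pvStepB pvFlushA
  by_cases hji : i = j
  · subst hji
    simp [pvSlice_self, PySem.Chars.stripChars]
  · simp only [hji, ne_eq, not_false_iff, true_and]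
    by_cases hc : PySem.Chars.stripChars (PySem.List.slice s (some j) (some i)) [' '] = []
    · simp [hc]
    · simp only [hc, not_false_iff, if_pos]
      set key := pvLstripSpace (PySem.List.slice s (some j) (some i)) with hkey
      rw [PySem.Dict.modify]
      rw [PySem.Dict.getD_setdefault_self]
      rw [pvSetdefault_insert]
      cases hg : d.get? key with
      | none => simp [PySem.Dict.getD, hg]
      | some v =>
        by_cases hv : v = []
        · subst hv; simp [PySem.Dict.getD, hg]
        · simp [hv, PySem.Dict.modify, PySem.Dict.getD, hg]

-- '[c] in l' ↔ c ∈ l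
lemma pvIsIn_singleton (c : Char) (l : List Char) :
    PySem.Chars.isIn [c] l = true ↔ c ∈ l := by
  rw [PySem.Chars.isIn_iff_infix]
  constructor
  · intro h; exact List.singleton_sublist.mp h.sublist
  · intro h
    obtain ⟨p, q, rfl⟩ := List.append_of_mem h
    exact ⟨p, q, by simp⟩

-- replace of a single character is a map
lemma pvReplaceGo (a b : Char) : ∀ (l : List Char) (fuel : Nat) (acc : List Char),
    l.length ≤ fuel →
    PySem.Chars.replace.go [a] [b] fuel l acc
      = acc.reverse ++ l.map (fun c => if c = a then b else c) := by
  intro l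
  induction l with
  | nil =>
    intro fuel acc _
    cases fuel <;> simp [PySem.Chars.replace.go]
  | cons c t ih =>
    intro fuel acc hle
    cases fuel with
    | zero => simp at hle
    | succ k =>
      rw [PySem.Chars.replace.go]
      by_cases hca : a = c
      · subst hca
        simp only [List.isPrefixOf, List.map_cons, if_pos rfl, beq_self_eq_true,
          Bool.true_and]
        rw [if_pos (by simp [List.isPrefixOf])]
        rw [show List.drop [a].length (a :: t) = t by simp]
        rw [ih k ([b].reverse ++ acc) (by simpa using hle)]
        simp
      · rw [if_neg (by
          simp only [List.isPrefixOf, Bool.and_true, beq_iff_eq, List.isPrefixOf_nil_left]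
          first | exact hca | exact fun h => hca (Eq.symm h))]
        rw [ih k (c :: acc) (by simpa using hle)]
        have hif : (if c = a then b else c) = c := if_neg (fun h => hca (Eq.symm h))
        rw [List.map_cons, hif]
        simp

lemma pvReplace_single (a b : Char) (l : List Char) :
    PySem.Chars.replace l [a] [b] = l.map (fun c => if c = a then b else c) := by
  rw [PySem.Chars.replace]
  rw [if_neg (by simp)]
  exact pvReplaceGo a b l l.length [] le_rfl

-- folding replace over the remaining delimiters is one map
lemma pvReplaceFold (d0 : Char) : ∀ (rest : List Char) (s : List Char),
    rest.foldl (fun acc ch => PySem.Chars.replace acc [ch] [d0]) s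
      = s.map (fun c => if rest.contains c then d0 else c) := by
  intro rest
  induction rest with
  | nil => intro s; simp
  | cons ch r ih =>
    intro s
    rw [List.foldl_cons, ih, pvReplace_single, List.map_map]
    apply List.map_congr_left
    intro c _
    by_cases hc : c = ch
    · subst hc; simp
    · by_cases hr : r.contains c <;> simp [hc, hr]

-- splitOn with a single-character separator equals the structural pvMySplit
lemma pvSplitGo (d : Char) : ∀ (l : List Char) (fuel : Nat) (cur : List Char)
    (acc : List (List Char)), l.length ≤ fuel →
    PySem.Chars.splitOn.go [d] fuel l cur acc
      = acc.reverse ++ (pvMySplit d l).modifyHead (fun x => cur.reverse ++ x) := by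
  intro l
  induction l with
  | nil =>
    intro fuel cur acc _
    cases fuel <;> simp [PySem.Chars.splitOn.go, pvMySplit]
  | cons c t ih =>
    intro fuel cur acc hle
    cases fuel with
    | zero => simp at hle
    | succ k =>
      rw [PySem.Chars.splitOn.go]
      by_cases hdc : d = c
      · subst hdc
        rw [if_pos (by simp [List.isPrefixOf])]
        rw [show List.drop [d].length (d :: t) = t by simp]
        rw [ih k [] (cur.reverse :: acc) (by simpa using hle)]
        simp [pvMySplit, pvModifyHead_id]
      · rw [if_neg (by
          simp only [List.isPrefixOf, Bool.and_true, beq_iff_eq, List.isPrefixOf_nil_left]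
          first | exact hdc | exact fun h => hdc (Eq.symm h))]
        rw [ih k (c :: cur) acc (by simpa using hle)]
        rw [pvMySplit, if_neg (fun h => hdc h.symm), pvModifyHead_comp]
        simp

lemma pvSplitOn_eq (d : Char) (l : List Char) :
    PySem.Chars.splitOn l [d] = pvMySplit d l := by
  rw [PySem.Chars.splitOn, pvSplitGo d l (l.length + 1) [] [] (by omega)]
  simp [pvModifyHead_id]

-- slice length on in-range natural bounds
lemma pvSlice_len (s : List Char) (j i : Nat) (hj : j ≤ i) (hi : i ≤ s.length) :
    (PySem.List.slice s (some (j : Int)) (some (i : Int))).length = i - j := by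
  rw [PySem.List.slice_natCast]
  simp
  omega

-- extending a slice by the next character
lemma pvSlice_ext (s : List Char) (j i : Nat) (hj : j ≤ i) (hi : i < s.length) :
    PySem.List.slice s (some (j : Int)) (some ((i : Int) + 1))
      = PySem.List.slice s (some (j : Int)) (some (i : Int)) ++ [s[i]] := by
  have h1 : ((i : Int) + 1) = (((i + 1 : Nat)) : Int) := by push_cast; ring
  rw [h1, PySem.List.slice_natCast, PySem.List.slice_natCast]
  have h2 : i + 1 - j = (i - j) + 1 := by omega
  rw [h2, List.take_succ]
  congr 1
  have hlen : i - j < (s.drop j).length := by simp; omega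
  rw [List.getElem?_eq_getElem hlen]
  simp only [List.getElem_drop, Option.toList_some]
  congr 2
  omega

-- A's loop over "" never fires
lemma pvLoopA_nil (s : List Char) : ∀ (fuel : Nat) (i j : Int)
    (d : PySem.Dict (List Char) (List Int)), pvLoopA s [] fuel i j d = (j, d) := by
  intro fuel
  induction fuel with
  | zero => intro i j d; rfl
  | succ k ih =>
    intro i j d
    rw [pvLoopA]
    cases hg : PySem.List.pyGet? s i with
    | none => rfl
    | some c =>
      have hniso : PySem.Chars.isIn [c] [] = false := by
        simp [PySem.Chars.isIn_eq_false_iff]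
      simp only [hniso, Bool.false_eq_true, if_false]
      exact ih (i + 1) j d

-- main invariant (delimiters = d0 :: rest): A's loop from index i with pending start j,
-- followed by its final flush, equals B's fold over the split pieces of the suffix,
-- with the pending prefix s[j:i] glued onto the first piece.
lemma pvMain (s : List Char) (d0 : Char) (rest : List Char) :
    ∀ (u : List Char) (i j : Nat) (dict : PySem.Dict (List Char) (List Int)),
    i ≤ s.length → j ≤ i → u = s.drop i →
    pvFlushA s (pvLoopA s (d0 :: rest) (s.length - i) (i : Int) (j : Int) dict).1
        (s.length : Int) (pvLoopA s (d0 :: rest) (s.length - i) (i : Int) (j : Int) dict).2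
      = (((pvMySplit d0 (u.map (fun c => if rest.contains c then d0 else c))).modifyHead
            (fun x => PySem.List.slice s (some (j : Int)) (some (i : Int)) ++ x)).foldl
          pvStepB ((j : Int), dict)).2 := by
  intro u
  induction u with
  | nil =>
    intro i j dict hi hj hu
    have hieq : i = s.length := by
      have := List.drop_eq_nil_iff.mp hu.symm
      omega
    subst hieq
    rw [show s.length - s.length = 0 by omega]
    rw [pvLoopA]
    simp only [List.map_nil, pvMySplit, List.modifyHead_cons, List.foldl_cons,
      List.foldl_nil, List.append_nil]
    exact (pvFlush_eq s (j : Int) (s.length : Int) dict).symm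
  | cons c u' ih =>
    intro i j dict hi hj hu
    have hlt : i < s.length := by
      by_contra h
      have : s.drop i = [] := List.drop_eq_nil_iff.mpr (by omega)
      rw [this] at hu; exact (List.cons_ne_nil c u') hu
    have hc : c = s[i] := by
      have := List.drop_eq_getElem_cons hlt
      rw [this] at hu
      exact (List.cons.injEq _ _ _ _ ▸ hu).1
    have hu' : u' = s.drop (i + 1) := by
      have := List.drop_eq_getElem_cons hlt
      rw [this] at hu
      exact (List.cons.injEq _ _ _ _ ▸ hu).2
    have hget : PySem.List.pyGet? s (i : Int) = some c := by
      simp [PySem.List.pyGet?_natCast, List.getElem?_eq_getElem hlt, hc]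
    have hfuel : s.length - i = (s.length - (i + 1)) + 1 := by omega
    have hone : ((i : Int) + 1) = (((i + 1 : Nat)) : Int) := by push_cast; ring
    rw [hfuel, pvLoopA, hget]
    by_cases hd : PySem.Chars.isIn [c] (d0 :: rest)
    · -- c is a delimiter: flush s[j:i] at j, restart at i+1
      have hmem : c = d0 ∨ c ∈ rest := by
        have := (pvIsIn_singleton c (d0 :: rest)).mp hd
        simpa using this
      have hfc : (if rest.contains c then d0 else c) = d0 := by
        rcases hmem with h | h
        · subst h; by_cases hr : rest.contains c <;> simp [hr]
        · have hr : rest.contains c = true := by simpa using h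
          rw [if_pos hr]
      simp only [hd, if_true]
      rw [hone]
      rw [ih (i + 1) (i + 1) (pvFlushA s (j : Int) (i : Int) dict) (by omega) le_rfl hu']
      rw [pvSlice_self]
      simp only [List.map_cons, hfc, pvMySplit, eq_self_iff_true, if_true,
        List.modifyHead_cons, List.foldl_cons]
      simp only [List.nil_append, pvModifyHead_id]
      -- the first pvStepB step produces exactly (i+1, flushed dict)
      have hstep : pvStepB ((j : Int), dict)
          (PySem.List.slice s (some (j : Int)) (some (i : Int)) ++ [])
          = ((((i + 1 : Nat)) : Int), pvFlushA s (j : Int) (i : Int) dict) := by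
        rw [List.append_nil]
        have h2 := pvFlush_eq s (j : Int) (i : Int) dict
        have hlen := pvSlice_len s j i hj (le_of_lt hlt)
        refine Prod.ext ?_ h2
        show (j : Int) + ((PySem.List.slice s (some (j:Int)) (some (i:Int))).length : Int) + 1 = _
        rw [hlen]
        push_cast [Nat.cast_sub hj]
        ring
      rw [hstep]
    · -- c is not a delimiter: extend the pending segment
      have hnmem : ¬ (c = d0 ∨ c ∈ rest) := by
        intro h
        exact hd ((pvIsIn_singleton c (d0 :: rest)).mpr (by simpa using h))
      have hfc : (if rest.contains c then d0 else c) = c := by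
        rw [if_neg (fun h => hnmem (Or.inr (by simpa using h)))]
      have hcd0 : ¬ c = d0 := fun h => hnmem (Or.inl h)
      simp only [hd, if_false, Bool.false_eq_true]
      rw [hone]
      rw [ih (i + 1) j dict (by omega) (by omega) hu']
      simp only [List.map_cons, hfc, pvMySplit, if_neg hcd0]
      rw [pvModifyHead_comp]
      have hsl : PySem.List.slice s (some (j : Int)) (some (((i + 1 : Nat)) : Int))
          = PySem.List.slice s (some (j : Int)) (some (i : Int)) ++ [s[i]] := by
        rw [← hone]; exact pvSlice_ext s j i hj hlt
      rw [hsl, ← hc]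
      simp only [List.append_assoc, List.singleton_append]

-- ===== VERDICT (by name: the statement is the Claim_ definition above) =====
theorem get_slice_pos_dict_spec : Claim_equal_get_slice_pos_dict := by
  intro sentence delimiters _
  unfold Spec_get_slice_pos_dict
  simp only [get_slice_pos_dict, get_slice_pos_dict_alt]
  cases hds : delimiters.toList with
  | nil =>
    rw [pvLoopA_nil]
    have h := pvFlush_eq sentence.toList 0 (sentence.toList.length : Int) PySem.Dict.empty
    have hsl : PySem.List.slice sentence.toList (some 0)
        (some (sentence.toList.length : Int)) = sentence.toList := by
      rw [show (0 : Int) = ((0 : Nat) : Int) by simp, PySem.List.slice_natCast]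
      simp
    rw [hsl] at h
    simp only [List.foldl_cons, List.foldl_nil]
    rw [← h]
  | cons d0 rest =>
    have hu : sentence.toList = sentence.toList.drop 0 := by simp
    have h := pvMain sentence.toList d0 rest sentence.toList 0 0 PySem.Dict.empty
      (by omega) le_rfl hu
    rw [pvSlice_self] at h
    simp only [Nat.cast_zero, Nat.sub_zero, List.nil_append, pvModifyHead_id] at h
    simp only [pvReplaceFold, pvSplitOn_eq]
    rw [h]
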